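-- pv_equiv track=rewrite | github.com/JohnBurtt10/Nix_Store_File_Browser | app/merge_dicts_with_preference.py | merge_2d_dicts_with_preference
-- ===== SOURCE A (Python) =====
-- def merge_2d_dicts_with_preference(dict1, dict2):
--     """
--     Merge two dictionaries with a preference for values from the first dictionary.
--
--     Args:
--     - dict1 (dict): The first dictionary.
--     - dict2 (dict): The second dictionary.
--
--     Returns:
--     - dict: A new dictionary combining values from both dictionaries with preference for dict1.
--     """
--     merged_dict = {}
--
--     # Iterate through the keys of the first dictionary
--     for key, inner_dict1 in dict1.items():
--         # If the key is present in both dictionaries and the values are dictionaries, merge them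
--         if key in dict2 and isinstance(inner_dict1, dict) and isinstance(dict2[key], dict):
--             merged_dict[key] = {**inner_dict1, **dict2[key]}
--         else:
--             # If the key is not present in dict2 or values are not dictionaries, take from dict1
--             merged_dict[key] = inner_dict1
--
--     # Add the keys from the second dictionary that are not present in the first dictionary
--     for key, inner_dict2 in dict2.items():
--         if key not in dict1:
--             merged_dict[key] = inner_dict2
--
--     return merged_dict
-- ===== SOURCE B (Python) =====
-- def merge_2d_dicts_with_preference(dict1, dict2):
--     """Copy-then-reconcile: seed with dict1, then one pass over dict2."""
--     merged = dict1.copy()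
--     for key, value in dict2.items():
--         if key not in merged:
--             merged[key] = value
--         else:
--             merged[key] = {**merged[key], **value}
--     return merged
-- ===== Notes on version B (the rewrite author's own statement) =====
-- stated objective: simpler
-- what changed: Replaces A's build-from-empty with two symmetric passes (one over dict1 with a membership test into dict2, one over dict2 with a membership test into dict1) by a copy-then-reconcile structure: seed merged with a shallow copy of dict1 and make a single pass over dict2 that appends new keys and in-place-merges shared ones.
import Mathlib
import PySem

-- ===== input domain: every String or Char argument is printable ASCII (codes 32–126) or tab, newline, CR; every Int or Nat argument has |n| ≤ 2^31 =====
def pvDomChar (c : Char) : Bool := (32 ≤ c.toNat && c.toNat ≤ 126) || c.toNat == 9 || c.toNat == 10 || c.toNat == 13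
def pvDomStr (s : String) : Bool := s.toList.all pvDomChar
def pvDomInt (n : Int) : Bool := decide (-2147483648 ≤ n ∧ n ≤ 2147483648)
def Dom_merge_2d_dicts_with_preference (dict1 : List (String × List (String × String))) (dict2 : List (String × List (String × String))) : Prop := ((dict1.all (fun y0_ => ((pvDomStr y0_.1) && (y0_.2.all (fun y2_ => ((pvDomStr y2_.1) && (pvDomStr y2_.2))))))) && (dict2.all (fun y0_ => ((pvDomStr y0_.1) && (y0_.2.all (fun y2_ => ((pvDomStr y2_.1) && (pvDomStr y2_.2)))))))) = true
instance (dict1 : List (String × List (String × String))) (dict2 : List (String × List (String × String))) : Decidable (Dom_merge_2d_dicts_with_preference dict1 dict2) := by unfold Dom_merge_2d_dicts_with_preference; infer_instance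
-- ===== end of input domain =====

-- B replaces A's two symmetric construction passes by copy-then-reconcile (seed with dict1, one pass over dict2); same result, simpler decomposition.


-- shared primitive: Python's {**a, **b} on the assoc-list encoding of a dict
def pyDictMerge (a b : List (String × String)) : List (String × String) :=
  ((PySem.Dict.mk a).update b).items

-- ===== PORT A =====
def merge_2d_dicts_with_preference (dict1 : List (String × List (String × String))) (dict2 : List (String × List (String × String))) : List (String × List (String × String)) :=
  let d1 : PySem.Dict String (List (String × String)) := PySem.Dict.mk dict1
  let d2 : PySem.Dict String (List (String × String)) := PySem.Dict.mk dict2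
  -- first loop: keys of dict1 (isinstance tests are always true at this type)
  let merged : PySem.Dict String (List (String × String)) :=
    dict1.foldl (fun m kv =>
      if d2.contains kv.1 then
        m.insert kv.1 (pyDictMerge kv.2 (d2.getD kv.1 []))
      else
        m.insert kv.1 kv.2) (PySem.Dict.mk [])
  -- second loop: keys of dict2 not present in dict1
  let merged :=
    dict2.foldl (fun m kv =>
      if !d1.contains kv.1 then m.insert kv.1 kv.2 else m) merged
  merged.items

-- ===== PORT B =====
def merge_2d_dicts_with_preference_alt (dict1 : List (String × List (String × String))) (dict2 : List (String × List (String × String))) : List (String × List (String × String)) :=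
  -- merged = dict1.copy()
  let merged : PySem.Dict String (List (String × String)) := PySem.Dict.mk dict1
  -- one pass over dict2.items()
  let merged :=
    dict2.foldl (fun m kv =>
      if !m.contains kv.1 then
        m.insert kv.1 kv.2
      else
        m.insert kv.1 (pyDictMerge (m.getD kv.1 []) kv.2)) merged
  merged.items

-- ===== PRECONDITION & SPEC =====
-- Pre_ excludes assoc lists with duplicate keys: they do not represent a Python dict
-- (a real dict argument always has distinct keys), and the two ports read such lists differently.
def Pre_merge_2d_dicts_with_preference (dict1 : List (String × List (String × String))) (dict2 : List (String × List (String × String))) : Prop :=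
  (dict1.map (·.1)).Nodup ∧ (dict2.map (·.1)).Nodup
instance (dict1 : List (String × List (String × String))) (dict2 : List (String × List (String × String))) : Decidable (Pre_merge_2d_dicts_with_preference dict1 dict2) := by unfold Pre_merge_2d_dicts_with_preference; infer_instance

def pvWitness_merge_2d_dicts_with_preference : (List (String × List (String × String))) × (List (String × List (String × String))) :=
  ([("a", [("x", "1"), ("y", "2")])], [("a", [("y", "9"), ("z", "3")]), ("b", [("w", "4")])])

def Spec_merge_2d_dicts_with_preference (dict1 : List (String × List (String × String))) (dict2 : List (String × List (String × String))) (out : List (String × List (String × String))) : Prop := out = merge_2d_dicts_with_preference_alt dict1 dict2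
instance (dict1 : List (String × List (String × String))) (dict2 : List (String × List (String × String))) (out : List (String × List (String × String))) : Decidable (Spec_merge_2d_dicts_with_preference dict1 dict2 out) := by unfold Spec_merge_2d_dicts_with_preference; infer_instance

-- ===== CLAIM (what is proved, stated in full; the proofs are below) =====
def Claim_equal_merge_2d_dicts_with_preference : Prop := ∀ (dict1 : List (String × List (String × String))) (dict2 : List (String × List (String × String))), Dom_merge_2d_dicts_with_preference dict1 dict2 → Pre_merge_2d_dicts_with_preference dict1 dict2 → Spec_merge_2d_dicts_with_preference dict1 dict2 (merge_2d_dicts_with_preference dict1 dict2)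

-- ===== LEMMAS AND PROOFS =====

-- the value a dict1 entry ends up with: merged with dict2's entry at the same key, if any
def pvUpd (l2 : List (String × List (String × String))) (p : String × List (String × String)) : String × List (String × String) :=
  if l2.any (fun q => q.1 == p.1) then (p.1, pyDictMerge p.2 ((PySem.Dict.mk l2).getD p.1 [])) else p

theorem pvUpd_cons_of_ne (kv : String × List (String × String)) (rest : List (String × List (String × String))) (p : String × List (String × String)) (h : kv.1 ≠ p.1) : pvUpd (kv :: rest) p = pvUpd rest p := by
  have hb : (kv.1 == p.1) = false := by simp [h]
  unfold pvUpd PySem.Dict.getD PySem.Dict.get?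
  simp only [List.any_cons, hb, Bool.false_or]
  rw [List.find?_cons_of_neg (by simp [h])]

theorem pvUpd_cons_of_eq (kv : String × List (String × String)) (rest : List (String × List (String × String))) (p : String × List (String × String)) (h : kv.1 = p.1) : pvUpd (kv :: rest) p = (p.1, pyDictMerge p.2 kv.2) := by
  have hb : (kv.1 == p.1) = true := by simp [h]
  unfold pvUpd PySem.Dict.getD PySem.Dict.get?
  simp only [List.any_cons, hb, Bool.true_or, if_true]
  rw [List.find?_cons_of_pos (by simp [h])]
  rfl

theorem pvUpd_of_not_mem (rest : List (String × List (String × String))) (p : String × List (String × String)) (h : p.1 ∉ rest.map (·.1)) : pvUpd rest p = p := by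
  unfold pvUpd
  have : rest.any (fun q => q.1 == p.1) = false := by
    rw [List.any_eq_false]
    intro q hq he
    have hqe : q.1 = p.1 := by simpa using he
    exact h (hqe ▸ List.mem_map_of_mem hq)
  simp [this]

theorem pvUpd_fst (l2 : List (String × List (String × String))) (p : String × List (String × String)) : (pvUpd l2 p).1 = p.1 := by
  unfold pvUpd; split <;> rfl

-- A's first loop builds exactly dict1.map (pvUpd dict2)
theorem A_phase1 (dict1 dict2 : List (String × List (String × String))) (h1 : (dict1.map (·.1)).Nodup) :
    (dict1.foldl (fun m kv =>
      if (PySem.Dict.mk dict2).contains kv.1 then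
        m.insert kv.1 (pyDictMerge kv.2 ((PySem.Dict.mk dict2).getD kv.1 []))
      else
        m.insert kv.1 kv.2) (PySem.Dict.mk [])).items = dict1.map (pvUpd dict2) := by
  have hstep : (fun (m : PySem.Dict String (List (String × String))) kv =>
      if (PySem.Dict.mk dict2).contains kv.1 then
        m.insert kv.1 (pyDictMerge kv.2 ((PySem.Dict.mk dict2).getD kv.1 []))
      else m.insert kv.1 kv.2)
      = fun m kv => m.insert kv.1 ((pvUpd dict2 kv).2) := by
    funext m kv
    unfold pvUpd
    simp only [PySem.Dict.contains]
    split <;> rfl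
  rw [hstep, PySem.Dict.items_foldl_insert_fresh dict1 (·.1) (fun kv => (pvUpd dict2 kv).2) _ (fun a _ => rfl) h1]
  have hfun : (fun (kv : String × List (String × String)) => (kv.1, (pvUpd dict2 kv).2)) = pvUpd dict2 := by
    funext p
    rw [show p.1 = (pvUpd dict2 p).1 from (pvUpd_fst dict2 p).symm]
  simp [hfun]

-- A's second loop appends the dict2 entries whose key misses a predicate-false test, when those keys are fresh
theorem A_phase2 (l2 : List (String × List (String × String))) (c : String → Bool)
    (m : PySem.Dict String (List (String × String)))
    (h2 : (l2.map (·.1)).Nodup)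
    (hf : ∀ kv ∈ l2, c kv.1 = true → m.contains kv.1 = false) :
    (l2.foldl (fun m kv => if c kv.1 then m.insert kv.1 kv.2 else m) m).items
      = m.items ++ l2.filter (fun kv => c kv.1) := by
  induction l2 generalizing m with
  | nil => simp
  | cons kv rest ih =>
    simp only [List.map_cons, List.nodup_cons] at h2
    simp only [List.foldl_cons, List.filter_cons]
    by_cases hc : c kv.1 = true
    · have hfresh : m.contains kv.1 = false := hf kv (by simp) hc
      rw [if_pos hc, ih _ h2.2 ?_]
      · rw [PySem.Dict.items_insert_of_not_contains _ _ hfresh]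
        simp [hc, List.append_assoc]
      · intro kv' hkv' hc'
        rw [PySem.Dict.contains_insert]
        have hne : kv'.1 ≠ kv.1 := by
          intro h; exact h2.1 (h ▸ (List.mem_map_of_mem hkv'))
        simp [hne, hf kv' (List.mem_cons_of_mem _ hkv') hc']
    · rw [if_neg hc, ih _ h2.2 (fun kv' h h' => hf kv' (List.mem_cons_of_mem _ h) h')]
      simp [hc]

-- B's loop: characterisation of the copy-then-reconcile fold
theorem B_loop (l2 : List (String × List (String × String)))
    (m : PySem.Dict String (List (String × String)))
    (hm : m.keys.Nodup) (h2 : (l2.map (·.1)).Nodup) :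
    (l2.foldl (fun m kv =>
      if !m.contains kv.1 then
        m.insert kv.1 kv.2
      else
        m.insert kv.1 (pyDictMerge (m.getD kv.1 []) kv.2)) m).items
      = m.items.map (pvUpd l2) ++ l2.filter (fun kv => !m.contains kv.1) := by
  induction l2 generalizing m with
  | nil =>
    rw [show pvUpd [] = id from funext fun p => rfl, List.map_id]
    simp
  | cons kv rest ih =>
    simp only [List.map_cons, List.nodup_cons] at h2
    simp only [List.foldl_cons, List.filter_cons]
    by_cases hc : m.contains kv.1 = true
    · -- key already present: overwrite in place
      rw [if_neg (by simp [hc]), ih _ (PySem.Dict.nodup_keys_insert _ _ _ hm) h2.2]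
      rw [PySem.Dict.items_insert_of_contains _ _ hc]
      have hmap : (List.map (fun p => if (p.1 == kv.1) = true then (kv.1, pyDictMerge (m.getD kv.1 []) kv.2) else p) m.items).map (pvUpd rest) = m.items.map (pvUpd (kv :: rest)) := by
        rw [List.map_map]
        apply List.map_congr_left
        intro p hp
        simp only [Function.comp]
        by_cases hb : (p.1 == kv.1) = true
        · have he : p.1 = kv.1 := by simpa using hb
          rw [if_pos hb, pvUpd_of_not_mem rest _ (by simpa using h2.1), pvUpd_cons_of_eq kv rest p he.symm]
          have : m.getD p.1 [] = p.2 := PySem.Dict.getD_of_mem_items m (by simpa using hp) hm []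
          rw [← he, this]
        · have he : kv.1 ≠ p.1 := fun h => hb (by simp [h])
          rw [if_neg hb, pvUpd_cons_of_ne kv rest p he]
      rw [hmap, if_neg (by simp [hc] : ¬ ((!m.contains kv.1) = true))]
      congr 1
      apply List.filter_congr
      intro x _
      rw [PySem.Dict.contains_insert]
      by_cases hx : (x.1 == kv.1) = true
      · have : x.1 = kv.1 := by simpa using hx
        simp [this, hc]
      · simp [hx]
    · -- new key: append
      have hc' : m.contains kv.1 = false := by simpa using hc
      rw [if_pos (by simp [hc']), ih _ (PySem.Dict.nodup_keys_insert _ _ _ hm) h2.2]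
      rw [PySem.Dict.items_insert_of_not_contains _ _ hc']
      have hnotin : ∀ p ∈ m.items, p.1 ≠ kv.1 := by
        intro p hp he
        have : m.items.any (fun q => q.1 == kv.1) = true := List.any_eq_true.mpr ⟨p, hp, by simp [he]⟩
        rw [show m.items.any (fun q => q.1 == kv.1) = m.contains kv.1 from rfl, hc'] at this
        exact Bool.false_ne_true this
      rw [List.map_append]
      have h1map : m.items.map (pvUpd rest) = m.items.map (pvUpd (kv :: rest)) := by
        apply List.map_congr_left
        intro p hp
        exact (pvUpd_cons_of_ne kv rest p (fun h => hnotin p hp h.symm)).symm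
      have h2kv : [kv].map (pvUpd rest) = [kv] := by
        simp [pvUpd_of_not_mem rest kv h2.1]
      rw [h1map, h2kv]
      have hfilt : rest.filter (fun kv' => !(m.insert kv.1 kv.2).contains kv'.1) = rest.filter (fun kv' => !m.contains kv'.1) := by
        apply List.filter_congr
        intro x hx
        rw [PySem.Dict.contains_insert]
        have : (x.1 == kv.1) = false := by
          simp only [beq_eq_false_iff_ne, ne_eq]
          intro he; exact h2.1 (he ▸ List.mem_map_of_mem hx)
        simp [this]
      rw [hfilt]
      simp [hc', List.append_assoc]

-- ===== VERDICT (by name: the statement is the Claim_ definition above) =====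
theorem merge_2d_dicts_with_preference_spec : Claim_equal_merge_2d_dicts_with_preference := by
  intro dict1 dict2 _ hpre
  obtain ⟨h1, h2⟩ := hpre
  unfold Spec_merge_2d_dicts_with_preference
  show (dict2.foldl (fun m kv => if !(PySem.Dict.mk dict1).contains kv.1 then m.insert kv.1 kv.2 else m)
          (dict1.foldl (fun m kv =>
            if (PySem.Dict.mk dict2).contains kv.1 then
              m.insert kv.1 (pyDictMerge kv.2 ((PySem.Dict.mk dict2).getD kv.1 []))
            else m.insert kv.1 kv.2) (PySem.Dict.mk []))).items
      = (dict2.foldl (fun m kv =>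
            if !m.contains kv.1 then m.insert kv.1 kv.2
            else m.insert kv.1 (pyDictMerge (m.getD kv.1 []) kv.2)) (PySem.Dict.mk dict1)).items
  have hB := B_loop dict2 (PySem.Dict.mk dict1) (by simpa [PySem.Dict.keys, PySem.Dict.items] using h1) h2
  rw [hB]
  have hA1 := A_phase1 dict1 dict2 h1
  have hfst : ∀ x, ((dict1.foldl (fun m kv =>
            if (PySem.Dict.mk dict2).contains kv.1 then
              m.insert kv.1 (pyDictMerge kv.2 ((PySem.Dict.mk dict2).getD kv.1 []))
            else m.insert kv.1 kv.2) (PySem.Dict.mk [])).contains x) = (PySem.Dict.mk dict1).contains x := by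
    intro x
    show (_ : PySem.Dict String (List (String × String))).items.any (fun p => p.1 == x) = _
    rw [hA1]
    show (dict1.map (pvUpd dict2)).any (fun p => p.1 == x) = dict1.any (fun p => p.1 == x)
    rw [List.any_map]
    rw [show ((fun (p : String × List (String × String)) => p.1 == x) ∘ pvUpd dict2) = (fun p => p.1 == x) from funext fun p => by rw [Function.comp_apply, pvUpd_fst]]
  have hf : ∀ kv ∈ dict2, (fun k => !(PySem.Dict.mk dict1).contains k) kv.1 = true →
      ((dict1.foldl (fun m kv =>
            if (PySem.Dict.mk dict2).contains kv.1 then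
              m.insert kv.1 (pyDictMerge kv.2 ((PySem.Dict.mk dict2).getD kv.1 []))
            else m.insert kv.1 kv.2) (PySem.Dict.mk []))).contains kv.1 = false := by
    intro kv _ hck
    rw [hfst kv.1]
    simpa using hck
  rw [A_phase2 dict2 (fun k => !(PySem.Dict.mk dict1).contains k) _ h2 hf, hA1]
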